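-- pv_equiv track=rewrite | github.com/rayyc/content-amplifier | src/content_analyzer.py | _identify_missing_elements
-- ===== SOURCE A (Python) =====
-- from typing import Dict, List
--
-- def _identify_missing_elements(content: str) -> List[str]:
--     """Identify what's missing from existing content"""
--     missing = []
--
--     # Check for common missing elements
--     checks = {
--         'working_code': ['example', 'code', 'snippet'],
--         'explanation': ['because', 'reason', 'why'],
--         'debugging': ['error', 'debug', 'fix'],
--         'production_ready': ['production', 'deploy', 'scale'],
--         'best_practices': ['best practice', 'recommended', 'should'],
--         'comparison': ['vs', 'versus', 'compare', 'difference'],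
--         'step_by_step': ['step', 'tutorial', 'guide'],
--     }
--
--     content_lower = content.lower()
--     for element, keywords in checks.items():
--         if not any(kw in content_lower for kw in keywords):
--             missing.append(element)
--
--     return missing
-- ===== SOURCE B (Python) =====
-- from typing import Dict, List
--
-- def _identify_missing_elements(content: str) -> List[str]:
--     """Identify what's missing from existing content"""
--     checks = {
--         'working_code': ['example', 'code', 'snippet'],
--         'explanation': ['because', 'reason', 'why'],
--         'debugging': ['error', 'debug', 'fix'],
--         'production_ready': ['production', 'deploy', 'scale'],
--         'best_practices': ['best practice', 'recommended', 'should'],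
--         'comparison': ['vs', 'versus', 'compare', 'difference'],
--         'step_by_step': ['step', 'tutorial', 'guide'],
--     }
--     content_lower = content.lower()
--     # Text-driven scan: walk the text once, position by position; at each
--     # position mark every category with a keyword starting there.  (All
--     # keywords are non-empty, so every occurrence starts at some position
--     # 0 <= i < len(content_lower).)
--     found = set()
--     for i in range(len(content_lower)):
--         for element, keywords in checks.items():
--             if element not in found and any(
--                     content_lower.startswith(kw, i) for kw in keywords):
--                 found.add(element)
--     return [element for element in checks if element not in found]
-- ===== Notes on version B (the rewrite author's own statement) =====
-- stated objective: alternative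
-- what changed: Replaces A's keyword-driven per-category any(kw in content_lower) membership tests by a single text-driven scan: iterate the positions of the lowered content once, at each position mark categories whose keyword starts there (startswith with offset), then return the complement of the found set over the keys in insertion order.
import Mathlib
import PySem

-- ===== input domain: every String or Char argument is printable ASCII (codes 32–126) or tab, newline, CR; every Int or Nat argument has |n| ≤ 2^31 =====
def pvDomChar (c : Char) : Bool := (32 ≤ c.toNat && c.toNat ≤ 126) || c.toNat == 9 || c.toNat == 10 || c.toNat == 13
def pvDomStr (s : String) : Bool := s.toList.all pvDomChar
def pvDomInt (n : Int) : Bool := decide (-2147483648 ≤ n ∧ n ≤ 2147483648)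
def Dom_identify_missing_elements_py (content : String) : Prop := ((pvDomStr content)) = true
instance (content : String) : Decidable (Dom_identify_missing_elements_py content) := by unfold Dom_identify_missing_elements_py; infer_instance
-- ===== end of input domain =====

-- B replaces A's keyword-driven `kw in content_lower` membership tests by a single
-- text-driven scan: it walks the lowered text position by position, marking each
-- category whose keyword starts there, and returns the complement (objective: alternative).


-- the literal `checks` dict (distinct keys; dict → association list per the type convention)
def pvChecks : List (String × List String) :=
  [("working_code", ["example", "code", "snippet"]),
   ("explanation", ["because", "reason", "why"]),
   ("debugging", ["error", "debug", "fix"]),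
   ("production_ready", ["production", "deploy", "scale"]),
   ("best_practices", ["best practice", "recommended", "should"]),
   ("comparison", ["vs", "versus", "compare", "difference"]),
   ("step_by_step", ["step", "tutorial", "guide"])]

-- ===== PORT A =====
def identify_missing_elements_py (content : String) : List String :=
  let checks := pvChecks
  let content_lower := PySem.Str.lower content
  checks.foldl (fun missing ekw =>
    if !(ekw.2.any (fun kw => PySem.Str.isIn kw content_lower)) then missing ++ [ekw.1]
    else missing) []

-- ===== PORT B =====
-- `content_lower.startswith(kw, i)` with 0 ≤ i is ported by hand as
-- `PySem.Chars.startswith ((toList content_lower).drop i.toNat) kw.toList` — exact,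
-- since Python's two-argument startswith with a nonnegative start tests the suffix from i.
def identify_missing_elements_py_alt (content : String) : List String :=
  let checks := pvChecks
  let cl := PySem.Chars.lower content.toList
  let found : PySem.Set String :=
    (PySem.List.pyRange 0 (cl.length : Int) 1).foldl (fun s i =>
      checks.foldl (fun s ekw =>
        if !(PySem.Set.contains s ekw.1) &&
           ekw.2.any (fun kw => PySem.Chars.startswith (cl.drop i.toNat) kw.toList) then
          PySem.Set.add s ekw.1
        else s) s) PySem.Set.empty
  (checks.map Prod.fst).filter (fun e => !(PySem.Set.contains found e))

-- ===== PRECONDITION & SPEC =====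
def Spec_identify_missing_elements_py (content : String) (out : List String) : Prop := out = identify_missing_elements_py_alt content
instance (content : String) (out : List String) : Decidable (Spec_identify_missing_elements_py content out) := by unfold Spec_identify_missing_elements_py; infer_instance

-- ===== CLAIM (what is proved, stated in full; the proofs are below) =====
def Claim_equal_identify_missing_elements_py : Prop := ∀ (content : String), Dom_identify_missing_elements_py content → Spec_identify_missing_elements_py content (identify_missing_elements_py content)

-- ===== LEMMAS AND PROOFS =====

-- membership after B's inner fold over the category list at one position (test p on a keyword)
theorem pv_mem_inner (p : String → Bool) (x : String) (pairs : List (String × List String))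
    (s : PySem.Set String) :
    (x ∈ pairs.foldl (fun s q =>
        if !(PySem.Set.contains s q.1) && q.2.any p then PySem.Set.add s q.1 else s) s) ↔
      (x ∈ s ∨ ∃ q ∈ pairs, x = q.1 ∧ q.2.any p = true) := by
  induction pairs generalizing s with
  | nil => simp
  | cons hd tl ih =>
    simp only [List.foldl_cons]
    rw [ih]
    by_cases hc : PySem.Set.contains s hd.1 = true
    · have hmem : hd.1 ∈ s := (PySem.Set.contains_iff s hd.1).mp hc
      simp only [hc]
      constructor
      · rintro (h | ⟨q, hq, h⟩)
        · exact Or.inl h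
        · exact Or.inr ⟨q, by simp [hq], h⟩
      · rintro (h | ⟨q, hq, hx, hf⟩)
        · exact Or.inl h
        · rcases List.mem_cons.mp hq with rfl | hq'
          · exact Or.inl (hx ▸ hmem)
          · exact Or.inr ⟨q, hq', hx, hf⟩
    · simp only [hc]
      by_cases hf : hd.2.any p = true
      · simp only [hf, Bool.not_false, Bool.true_and, if_true,
          PySem.Set.mem_add]
        constructor
        · rintro ((h | h) | ⟨q, hq, h⟩)
          · exact Or.inl h
          · exact Or.inr ⟨hd, by simp, h, hf⟩
          · exact Or.inr ⟨q, by simp [hq], h⟩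
        · rintro (h | ⟨q, hq, hx, hf'⟩)
          · exact Or.inl (Or.inl h)
          · rcases List.mem_cons.mp hq with rfl | hq'
            · exact Or.inl (Or.inr hx)
            · exact Or.inr ⟨q, hq', hx, hf'⟩
      · simp only [hf]
        constructor
        · rintro (h | ⟨q, hq, h⟩)
          · exact Or.inl h
          · exact Or.inr ⟨q, by simp [hq], h⟩
        · rintro (h | ⟨q, hq, hx, hf'⟩)
          · exact Or.inl h
          · rcases List.mem_cons.mp hq with rfl | hq'
            · exact absurd hf' hf
            · exact Or.inr ⟨q, hq', hx, hf'⟩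

-- membership after B's outer fold over the positions
theorem pv_mem_found (p : Int → String → Bool) (x : String) (is : List Int)
    (pairs : List (String × List String)) (s : PySem.Set String) :
    (x ∈ is.foldl (fun s i =>
        pairs.foldl (fun s q =>
          if !(PySem.Set.contains s q.1) && q.2.any (p i) then PySem.Set.add s q.1 else s) s) s) ↔
      (x ∈ s ∨ ∃ i ∈ is, ∃ q ∈ pairs, x = q.1 ∧ q.2.any (p i) = true) := by
  induction is generalizing s with
  | nil => simp
  | cons i it ih =>
    simp only [List.foldl_cons]
    rw [ih]
    constructor
    · rintro (h | ⟨j, hj, h⟩)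
      · rcases (pv_mem_inner (p i) x pairs s).mp h with h' | ⟨q, hq, h'⟩
        · exact Or.inl h'
        · exact Or.inr ⟨i, by simp, q, hq, h'⟩
      · exact Or.inr ⟨j, by simp [hj], h⟩
    · rintro (h | ⟨j, hj, h⟩)
      · exact Or.inl ((pv_mem_inner (p i) x pairs s).mpr (Or.inl h))
      · rcases List.mem_cons.mp hj with rfl | hj'
        · exact Or.inl ((pv_mem_inner (p j) x pairs s).mpr (Or.inr h))
        · exact Or.inr ⟨j, hj', h⟩

-- the position scan finds a non-empty keyword iff it is a substring
theorem pv_scan_iff_isIn (cl : List Char) (kw : List Char) (hkw : kw ≠ []) :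
    (∃ i ∈ PySem.List.pyRange 0 (cl.length : Int) 1,
        PySem.Chars.startswith (cl.drop i.toNat) kw = true) ↔
      PySem.Chars.isIn kw cl = true := by
  rw [← PySem.Chars.exists_prefix_drop_iff_isIn]
  constructor
  · rintro ⟨i, _, h⟩
    exact ⟨i.toNat, (PySem.Chars.startswith_iff _ _).mp h⟩
  · rintro ⟨j, h⟩
    have hj : j < cl.length := by
      by_contra hge
      rw [List.drop_eq_nil_of_le (by omega)] at h
      exact hkw (List.prefix_nil.mp h)
    refine ⟨(j : Int), ?_, ?_⟩
    · rw [PySem.List.mem_pyRange_one]; omega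
    · rw [PySem.Chars.startswith_iff]; simpa using h

-- under distinct keys, the existential at a listed key collapses to that key's own test
theorem pv_key_lookup (P : String × List String → Prop) (l : List (String × List String))
    (hn : (l.map Prod.fst).Nodup) (ekw : String × List String) (h : ekw ∈ l) :
    ((∃ q ∈ l, ekw.1 = q.1 ∧ P q) ↔ P ekw) := by
  constructor
  · rintro ⟨q, hq, heq, hf⟩
    have : q = ekw := List.inj_on_of_nodup_map hn hq h heq.symm
    exact this ▸ hf
  · intro hf; exact ⟨ekw, h, rfl, hf⟩

-- the equivalence, abstracted over the lowered text
theorem pv_main (cl : List Char) :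
    pvChecks.foldl (fun missing ekw =>
        if !(ekw.2.any fun kw => PySem.Chars.isIn kw.toList cl) then missing ++ [ekw.1]
        else missing) [] =
      (pvChecks.map Prod.fst).filter (fun e =>
        !(PySem.Set.contains
          ((PySem.List.pyRange 0 (cl.length : Int) 1).foldl (fun s i =>
            pvChecks.foldl (fun s ekw =>
              if !(PySem.Set.contains s ekw.1) &&
                 ekw.2.any (fun kw => PySem.Chars.startswith (cl.drop i.toNat) kw.toList) then
                PySem.Set.add s ekw.1
              else s) s) PySem.Set.empty) e)) := by
  simp only [PySem.List.foldl_append_if, List.nil_append, List.filter_map]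
  congr 1
  apply List.filter_congr
  intro ekw hmem
  have hn : (pvChecks.map Prod.fst).Nodup := by decide
  have hkws : ∀ kw ∈ ekw.2, kw.toList ≠ [] := by
    fin_cases hmem <;> simp
  have hany : (∃ i ∈ PySem.List.pyRange 0 (cl.length : Int) 1,
      ekw.2.any (fun kw => PySem.Chars.startswith (cl.drop i.toNat) kw.toList) = true) ↔
      (ekw.2.any fun kw => PySem.Chars.isIn kw.toList cl) = true := by
    simp only [List.any_eq_true]
    constructor
    · rintro ⟨i, hi, kw, hkw, h⟩
      exact ⟨kw, hkw, (pv_scan_iff_isIn cl kw.toList (hkws kw hkw)).mp ⟨i, hi, h⟩⟩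
    · rintro ⟨kw, hkw, h⟩
      rcases (pv_scan_iff_isIn cl kw.toList (hkws kw hkw)).mpr h with ⟨i, hi, h'⟩
      exact ⟨i, hi, kw, hkw, h'⟩
  have hf : PySem.Set.contains
      ((PySem.List.pyRange 0 (cl.length : Int) 1).foldl (fun s i =>
        pvChecks.foldl (fun s q =>
          if !(PySem.Set.contains s q.1) &&
             q.2.any (fun kw => PySem.Chars.startswith (cl.drop i.toNat) kw.toList) then
            PySem.Set.add s q.1
          else s) s) PySem.Set.empty) ekw.1 =
      (ekw.2.any fun kw => PySem.Chars.isIn kw.toList cl) := by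
    by_cases hx : (ekw.2.any fun kw => PySem.Chars.isIn kw.toList cl) = true
    · rw [hx, PySem.Set.contains_iff,
        pv_mem_found (fun i kw => PySem.Chars.startswith (cl.drop i.toNat) kw.toList)]
      rcases hany.mpr hx with ⟨i, hi, h⟩
      exact Or.inr ⟨i, hi, ekw, hmem, rfl, h⟩
    · rw [Bool.eq_false_iff.mpr hx, ← Bool.not_eq_true, PySem.Set.contains_iff,
        pv_mem_found (fun i kw => PySem.Chars.startswith (cl.drop i.toNat) kw.toList)]
      rintro (h | ⟨i, hi, h⟩)
      · simp [PySem.Set.empty] at h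
      · rw [pv_key_lookup _ pvChecks hn ekw hmem] at h
        exact hx (hany.mp ⟨i, hi, h⟩)
  simp only [Function.comp_apply, hf]

-- ===== VERDICT (by name: the statement is the Claim_ definition above) =====
theorem identify_missing_elements_py_spec : Claim_equal_identify_missing_elements_py := by
  intro content _
  show _ = _
  unfold identify_missing_elements_py identify_missing_elements_py_alt
  have h : ∀ kw : String, PySem.Str.isIn kw (PySem.Str.lower content) =
      PySem.Chars.isIn kw.toList (PySem.Chars.lower content.toList) := by
    intro kw; simp [PySem.Str.isIn]
  simp only [h]
  exact pv_main (PySem.Chars.lower content.toList)
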